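-- pv_equiv track=rewrite | github.com/brillantescene/Coding_Test | BOJ/DAY_5.py | dp
-- ===== SOURCE A (Python) =====
-- def dp(n):
--     count = 0
--     if n in [1, 2, 3]:
--         return memo[n]
--     while n != 0:
--         if n >= 9:
--             n -= 9
--             count += 1
--             dp(n)
--         elif n >= 4:
--             n -= 4
--             count += 1
--             dp(n)
--         else:
--             count += n
--             n = 0
--     return count
--
-- memo = [0, 1, 2, 3]
-- ===== SOURCE B (Python) =====
-- def dp(n):
--     # Closed form: greedy 9s then 4s then 1s; below 4 the original just returns n.
--     if n < 4:
--         return n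
--     return n // 9 + (n % 9) // 4 + (n % 9) % 4
-- ===== Notes on version B (the rewrite author's own statement) =====
-- stated objective: simpler
-- what changed: Replaced the greedy while-loop with dead recursive calls by a direct closed-form count (n//9 + (n%9)//4 + (n%9)%4), guarding n<4 where the original returns n; Pre_ excludes large positive n, where A's dead self-calls recurse ~n/9 deep and raise RecursionError (or its exponential dead recursion never finishes) so A returns no value there.
import Mathlib
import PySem

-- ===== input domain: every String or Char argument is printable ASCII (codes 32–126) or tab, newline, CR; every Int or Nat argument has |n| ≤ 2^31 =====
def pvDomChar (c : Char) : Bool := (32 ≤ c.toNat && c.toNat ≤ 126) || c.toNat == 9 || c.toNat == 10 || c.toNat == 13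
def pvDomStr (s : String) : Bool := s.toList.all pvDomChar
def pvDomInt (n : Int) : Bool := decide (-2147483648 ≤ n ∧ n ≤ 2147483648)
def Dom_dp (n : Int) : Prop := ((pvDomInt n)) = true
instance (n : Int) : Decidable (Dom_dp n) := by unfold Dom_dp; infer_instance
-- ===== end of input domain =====

-- B replaces A's greedy subtraction loop (with dead recursive calls) by a closed-form count; objective: simpler.

-- ===== PORT A =====
-- memo = [0, 1, 2, 3]
def pvMemo : List Int := [0, 1, 2, 3]

mutual
-- the while-loop of A: state is (n, count); the final 'else' branch sets n := 0
-- and the loop then exits returning count + n.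
def dpGo (n : Int) (count : Int) : Int :=
  if _h : n ≠ 0 then
    if h9 : n ≥ 9 then
      let _ := dp (n - 9)        -- dead recursive call, as in A
      dpGo (n - 9) (count + 1)
    else if h4 : n ≥ 4 then
      let _ := dp (n - 4)        -- dead recursive call, as in A
      dpGo (n - 4) (count + 1)
    else
      count + n                  -- count += n; n = 0; loop exits returning count
  else count
termination_by (n.toNat, 0)
decreasing_by
  · exact Prod.Lex.left _ _ (by omega)
  · exact Prod.Lex.left _ _ (by omega)
  · exact Prod.Lex.left _ _ (by omega)
  · exact Prod.Lex.left _ _ (by omega)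

def dp (n : Int) : Int :=
  if n = 1 ∨ n = 2 ∨ n = 3 then
    -- memo[n]: the index is 1, 2 or 3, always in range, so the default is never used
    (PySem.List.pyGet? pvMemo n).getD 0
  else
    dpGo n 0
termination_by (n.toNat, 1)
decreasing_by exact Prod.Lex.right _ (by omega)
end

-- ===== PORT B =====
def dp_alt (n : Int) : Int :=
  if n < 4 then n
  else PySem.Int.floordiv n 9 + PySem.Int.floordiv (PySem.Int.mod n 9) 4
       + PySem.Int.mod (PySem.Int.mod n 9) 4

-- ===== PRECONDITION & SPEC =====
-- Pre_ excludes large positive n: there A's dead self-calls dp(n-9)/dp(n-4) recurse about n/9 frames deep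
-- and raise RecursionError (and already far below that bound A's exponential dead recursion never finishes);
-- A returns no value on any excluded input.
def Pre_dp (n : Int) : Prop := n ≤ 80000
instance (n : Int) : Decidable (Pre_dp n) := by unfold Pre_dp; infer_instance
def pvWitness_dp : Int := (13)

def Spec_dp (n : Int) (out : Int) : Prop := out = dp_alt n
instance (n : Int) (out : Int) : Decidable (Spec_dp n out) := by unfold Spec_dp; infer_instance

-- ===== CLAIM (what is proved, stated in full; the proofs are below) =====
def Claim_equal_dp : Prop := ∀ (n : Int), Dom_dp n → Pre_dp n → Spec_dp n (dp n)

-- ===== LEMMAS AND PROOFS =====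

-- closed form for the loop on nonnegative n
theorem dpGo_closed (k : Nat) : ∀ count : Int,
    dpGo (k : Int) count
      = count + (k / 9 + (k % 9) / 4 + (k % 9) % 4 : Nat) := by
  induction k using Nat.strong_induction_on with
  | _ k ih =>
    intro count
    by_cases h0 : (k : Int) = 0
    · have : k = 0 := by exact_mod_cast h0
      subst this
      simp [dpGo]
    · rw [dpGo]
      by_cases h9 : (k : Int) ≥ 9
      · have hk9 : 9 ≤ k := by exact_mod_cast h9
        have : ((k : Int) - 9) = ((k - 9 : Nat) : Int) := by push_cast [hk9]; ring
        rw [dif_pos h0, dif_pos h9, this, ih (k - 9) (by omega)]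
        push_cast
        omega
      · by_cases h4 : (k : Int) ≥ 4
        · have hk4 : 4 ≤ k := by exact_mod_cast h4
          have hlt : k < 9 := by by_contra h; exact h9 (by exact_mod_cast Nat.le_of_not_lt h)
          have : ((k : Int) - 4) = ((k - 4 : Nat) : Int) := by push_cast [hk4]; ring
          rw [dif_pos h0, dif_neg h9, dif_pos h4, this, ih (k - 4) (by omega)]
          push_cast
          omega
        · have hk0 : k ≠ 0 := fun h => h0 (by exact_mod_cast h)
          have hlt : k < 4 := by by_contra h; exact h4 (by exact_mod_cast Nat.le_of_not_lt h)
          rw [dif_pos h0, dif_neg h9, dif_neg h4]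
          push_cast
          omega

-- dp n = n for n < 4 (memo hits and the degenerate loop cases)
theorem dp_small (n : Int) (h : n < 4) : dp n = n := by
  rw [dp]
  by_cases hm : n = 1 ∨ n = 2 ∨ n = 3
  · rcases hm with h1 | h2 | h3 <;> subst_vars <;> decide
  · rw [if_neg hm, dpGo]
    by_cases h0 : n ≠ 0
    · rw [dif_pos h0, dif_neg (by omega), dif_neg (by omega)]; omega
    · rw [dif_neg h0]; omega

-- ===== VERDICT (by name: the statement is the Claim_ definition above) =====
theorem dp_spec : Claim_equal_dp := by
  intro n _ _
  unfold Spec_dp dp_alt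
  by_cases h : n < 4
  · rw [if_pos h, dp_small n h]
  · rw [if_neg h]
    have hn : n = ((n.toNat : Nat) : Int) := by omega
    rw [dp]
    rw [if_neg (by omega)]
    rw [hn, dpGo_closed n.toNat 0]
    simp only [PySem.Int.floordiv_eq_ediv_of_pos (by norm_num : (0:Int) < 9),
      PySem.Int.floordiv_eq_ediv_of_pos (by norm_num : (0:Int) < 4),
      PySem.Int.mod_eq_emod_of_pos (by norm_num : (0:Int) < 9),
      PySem.Int.mod_eq_emod_of_pos (by norm_num : (0:Int) < 4)]
    push_cast
    omega
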